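-- pv_equiv track=rewrite | github.com/20jastrobel/TESTYTESTINGforTesting-For-Trying-Again | pipelines/bench_hh_ed.py | _sector_splits_for_total_ne
-- ===== SOURCE A (Python) =====
-- from typing import Any, Dict, List, Optional, Sequence, Tuple
--
-- def _sector_splits_for_total_ne(n_sites: int, n_e: int) -> List[Tuple[int, int]]:
--     L = int(n_sites)
--     ne_i = int(n_e)
--     out: List[Tuple[int, int]] = []
--     for n_up in range(L + 1):
--         n_dn = ne_i - n_up
--         if 0 <= n_dn <= L:
--             out.append((int(n_up), int(n_dn)))
--     return out
-- ===== SOURCE B (Python) =====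
-- from typing import List, Tuple
--
-- def _sector_splits_for_total_ne(n_sites: int, n_e: int) -> List[Tuple[int, int]]:
--     # Walk DOWN from the largest candidate n_up = min(L, n_e), emitting pairs while
--     # they stay valid (validity is the loop condition, not a filter), then reverse.
--     # Correct because the valid n_up form one contiguous interval ending at min(L, n_e).
--     L = int(n_sites)
--     ne = int(n_e)
--     out: List[Tuple[int, int]] = []
--     u = min(L, ne)
--     while u >= 0 and ne - u <= L:
--         out.append((u, ne - u))
--         u -= 1
--     out.reverse()
--     return out
-- ===== Notes on version B (the rewrite author's own statement) =====
-- stated objective: alternative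
-- what changed: B abandons A's forward scan over all L+1 candidates with a bound filter: it starts at the largest valid n_up = min(L, n_e), walks downward emitting pairs while they remain valid (validity is the loop's termination condition, so it touches only valid pairs and stops early), and reverses the collected list.
import Mathlib
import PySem

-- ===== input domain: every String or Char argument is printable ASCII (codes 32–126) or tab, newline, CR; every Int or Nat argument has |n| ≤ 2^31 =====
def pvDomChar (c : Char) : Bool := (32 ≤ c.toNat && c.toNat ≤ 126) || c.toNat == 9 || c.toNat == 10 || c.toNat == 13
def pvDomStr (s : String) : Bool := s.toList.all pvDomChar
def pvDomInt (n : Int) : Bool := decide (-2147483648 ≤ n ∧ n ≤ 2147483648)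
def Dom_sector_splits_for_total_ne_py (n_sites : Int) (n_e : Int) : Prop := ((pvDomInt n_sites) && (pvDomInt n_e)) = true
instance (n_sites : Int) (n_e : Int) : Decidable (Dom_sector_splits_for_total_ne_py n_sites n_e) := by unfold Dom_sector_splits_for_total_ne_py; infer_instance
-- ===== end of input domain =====

-- B replaces A's forward scan of all L+1 candidates (with a bound filter) by a downward
-- walk from the largest valid n_up = min(L, n_e) that stops as soon as a pair is invalid,
-- then reverses the collected list (alternative: touches only the valid pairs).


-- ===== PORT A =====
-- for n_up in range(L+1): n_dn = ne - n_up; if 0 <= n_dn <= L: out.append((n_up, n_dn))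
def sector_splits_for_total_ne_py (n_sites : Int) (n_e : Int) : List (Int × Int) :=
  (PySem.List.pyRange 0 (n_sites + 1) 1).foldl
    (fun out n_up =>
      if 0 ≤ n_e - n_up ∧ n_e - n_up ≤ n_sites then out ++ [(n_up, n_e - n_up)] else out)
    []

-- ===== PORT B =====
-- u = min(L, ne); while u >= 0 and ne - u <= L: out.append((u, ne-u)); u -= 1; out.reverse()
def sector_splits_altLoop (L ne : Int) (u : Int) (out : List (Int × Int)) : List (Int × Int) :=
  if _h : 0 ≤ u ∧ ne - u ≤ L then
    sector_splits_altLoop L ne (u - 1) (out ++ [(u, ne - u)])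
  else out
termination_by (u + 1).toNat
decreasing_by omega

def sector_splits_for_total_ne_py_alt (n_sites : Int) (n_e : Int) : List (Int × Int) :=
  (sector_splits_altLoop n_sites n_e (min n_sites n_e) []).reverse

-- ===== PRECONDITION & SPEC =====
def Spec_sector_splits_for_total_ne_py (n_sites : Int) (n_e : Int) (out : List (Int × Int)) : Prop := out = sector_splits_for_total_ne_py_alt n_sites n_e
instance (n_sites : Int) (n_e : Int) (out : List (Int × Int)) : Decidable (Spec_sector_splits_for_total_ne_py n_sites n_e out) := by unfold Spec_sector_splits_for_total_ne_py; infer_instance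

-- ===== CLAIM (what is proved, stated in full; the proofs are below) =====
def Claim_equal_sector_splits_for_total_ne_py : Prop := ∀ (n_sites : Int) (n_e : Int), Dom_sector_splits_for_total_ne_py n_sites n_e → Spec_sector_splits_for_total_ne_py n_sites n_e (sector_splits_for_total_ne_py n_sites n_e)

-- ===== LEMMAS AND PROOFS =====

-- Filtering an increasing unit range by membership in [lo, hi] yields the clipped unit range.
theorem filter_pyRange_interval (lo hi : Int) :
    ∀ (n : Nat) (a b : Int), (b - a).toNat = n →
      (PySem.List.pyRange a b 1).filter (fun u => decide (lo ≤ u ∧ u ≤ hi)) =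
        PySem.List.pyRange (max a lo) (min b (hi + 1)) 1 := by
  intro n
  induction n with
  | zero =>
    intro a b h
    rw [PySem.List.pyRange_one_eq_nil (by omega),
        PySem.List.pyRange_one_eq_nil (by omega : min b (hi + 1) ≤ max a lo)]
    rfl
  | succ n ih =>
    intro a b h
    have hab : a < b := by omega
    rw [PySem.List.pyRange_one_cons hab, List.filter_cons]
    by_cases hc : lo ≤ a ∧ a ≤ hi
    · simp only [hc, and_self, decide_true, if_true]
      rw [ih (a + 1) b (by omega)]
      have h1 : max a lo = a := by omega
      have h2 : max (a + 1) lo = a + 1 := by omega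
      rw [h1, h2, PySem.List.pyRange_one_cons (by omega : a < min b (hi + 1))]
    · simp only [decide_eq_true_eq, hc, if_false]
      rw [ih (a + 1) b (by omega)]
      rcases not_and_or.mp hc with hlo | hhi
      · have h1 : max a lo = lo := by omega
        have h2 : max (a + 1) lo = lo := by omega
        rw [h1, h2]
      · rw [PySem.List.pyRange_one_eq_nil (by omega : min b (hi + 1) ≤ max (a + 1) lo),
            PySem.List.pyRange_one_eq_nil (by omega : min b (hi + 1) ≤ max a lo)]

-- B's downward loop collects exactly the valid range [max 0 (ne-L), u], in reversed order.
theorem altLoop_eq (L ne : Int) :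
    ∀ (n : Nat) (u : Int) (out : List (Int × Int)), (u + 1).toNat = n →
      sector_splits_altLoop L ne u out =
        out ++ (((PySem.List.pyRange (max 0 (ne - L)) (u + 1) 1).map
                  (fun v => (v, ne - v))).reverse) := by
  intro n
  induction n with
  | zero =>
    intro u out h
    rw [sector_splits_altLoop, dif_neg (by omega),
        PySem.List.pyRange_one_eq_nil (by omega : u + 1 ≤ max 0 (ne - L))]
    simp
  | succ n ih =>
    intro u out h
    rw [sector_splits_altLoop]
    by_cases hc : 0 ≤ u ∧ ne - u ≤ L
    · rw [dif_pos hc, ih (u - 1) _ (by omega),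
          PySem.List.pyRange_one_succ_right (by omega : max 0 (ne - L) ≤ u)]
      have hs : u - 1 + 1 = u := by omega
      rw [hs]
      simp
    · rw [dif_neg hc,
          PySem.List.pyRange_one_eq_nil (by omega : u + 1 ≤ max 0 (ne - L))]
      simp

-- ===== VERDICT (by name: the statement is the Claim_ definition above) =====
theorem sector_splits_for_total_ne_py_spec : Claim_equal_sector_splits_for_total_ne_py := by
  intro L ne _
  unfold Spec_sector_splits_for_total_ne_py sector_splits_for_total_ne_py
    sector_splits_for_total_ne_py_alt
  have hf : (fun (out : List (Int × Int)) (n_up : Int) =>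
      if 0 ≤ ne - n_up ∧ ne - n_up ≤ L then out ++ [(n_up, ne - n_up)] else out) =
      (fun out n_up =>
        if (fun u => decide (ne - L ≤ u ∧ u ≤ ne)) n_up = true
        then out ++ [(fun u => (u, ne - u)) n_up] else out) := by
    funext out u
    simp only [decide_eq_true_eq]
    by_cases h0 : ne - L ≤ u ∧ u ≤ ne
    · rw [if_pos (by omega : 0 ≤ ne - u ∧ ne - u ≤ L), if_pos h0]
    · rw [if_neg (by omega : ¬(0 ≤ ne - u ∧ ne - u ≤ L)), if_neg h0]
  rw [hf, PySem.List.foldl_append_if,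
      filter_pyRange_interval (ne - L) ne ((L + 1) - 0).toNat 0 (L + 1) rfl,
      altLoop_eq L ne (min L ne + 1).toNat (min L ne) [] rfl]
  simp only [List.nil_append, List.reverse_reverse]
  (congr 2; omega)
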